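-- pv_equiv track=rewrite | github.com/nikita2206/heating | scripts/humanize_serial_log.py | decode_status_id0
-- ===== SOURCE A (Python) =====
-- def decode_status_id0(data_u16: int) -> str:
--     hb = (data_u16 >> 8) & 0xFF  # Master status (HB)
--     lb = data_u16 & 0xFF         # Slave status (LB)
--
--     master_bits = {
--         0: "CH",
--         1: "DHW",
--         2: "Cooling",
--         3: "OTC",
--         4: "CH2",
--         5: "SummerMode",   # 1 = summer, 0 = winter
--         6: "DHWBlocking",
--         7: "reserved",
--     }
--     slave_bits = {
--         0: "Fault",
--         1: "CHMode",
--         2: "DHWMode",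
--         3: "Flame",
--         4: "CoolingMode",
--         5: "CH2Mode",
--         6: "Diagnostic",
--         7: "ElectricityProd",
--     }
--
--     def pretty_master(bit: int, val: int) -> str:
--         on = (val >> bit) & 1
--         if bit == 0: return f"CH={'enabled' if on else 'disabled'}"
--         if bit == 1: return f"DHW={'enabled' if on else 'disabled'}"
--         if bit == 2: return f"Cooling={'enabled' if on else 'disabled'}"
--         if bit == 3: return f"OTC={'active' if on else 'inactive'}"
--         if bit == 4: return f"CH2={'enabled' if on else 'disabled'}"
--         if bit == 5: return f"Mode={'summer' if on else 'winter'}"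
--         if bit == 6: return f"DHWBlocking={'blocked' if on else 'unblocked'}"
--         if bit == 7: return "reserved"
--         return f"{master_bits.get(bit, f'bit{bit}')}={on}"
--
--     def pretty_slave(bit: int, val: int) -> str:
--         on = (val >> bit) & 1
--         if bit == 0: return f"Fault={'yes' if on else 'no'}"
--         if bit == 1: return f"CHMode={'active' if on else 'inactive'}"
--         if bit == 2: return f"DHWMode={'active' if on else 'inactive'}"
--         if bit == 3: return f"Flame={'on' if on else 'off'}"
--         if bit == 4: return f"CoolingMode={'active' if on else 'inactive'}"
--         if bit == 5: return f"CH2Mode={'active' if on else 'inactive'}"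
--         if bit == 6: return f"Diagnostic={'event' if on else 'none'}"
--         if bit == 7: return f"ElectricityProduction={'on' if on else 'off'}"
--         return f"{slave_bits.get(bit, f'bit{bit}')}={on}"
--
--     master_desc = "; ".join(pretty_master(b, hb) for b in range(0, 8))
--     slave_desc  = "; ".join(pretty_slave(b, lb) for b in range(0, 8))
--     return f"MasterStatus(HB): {master_desc} | SlaveStatus(LB): {slave_desc}"
-- ===== SOURCE B (Python) =====
-- # One template string with {} placeholders filled in a single format call;
-- # each placeholder's word is picked by one bit of data_u16 directly (no byte split).
-- TEMPLATE = ("MasterStatus(HB): CH={}; DHW={}; Cooling={}; OTC={}; CH2={}; "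
--             "Mode={}; DHWBlocking={}; reserved | SlaveStatus(LB): Fault={}; "
--             "CHMode={}; DHWMode={}; Flame={}; CoolingMode={}; CH2Mode={}; "
--             "Diagnostic={}; ElectricityProduction={}")
--
-- # (shift into data_u16, word when bit is 0, word when bit is 1)
-- FIELDS = (
--     (8, "disabled", "enabled"),
--     (9, "disabled", "enabled"),
--     (10, "disabled", "enabled"),
--     (11, "inactive", "active"),
--     (12, "disabled", "enabled"),
--     (13, "winter", "summer"),
--     (14, "unblocked", "blocked"),
--     (0, "no", "yes"),
--     (1, "inactive", "active"),
--     (2, "inactive", "active"),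
--     (3, "off", "on"),
--     (4, "inactive", "active"),
--     (5, "inactive", "active"),
--     (6, "none", "event"),
--     (7, "off", "on"),
-- )
--
--
-- def decode_status_id0(data_u16: int) -> str:
--     return TEMPLATE.format(*(on if (data_u16 >> s) & 1 else off
--                              for s, off, on in FIELDS))
-- ===== Notes on version B (the rewrite author's own statement) =====
-- stated objective: alternative
-- what changed: Instead of splitting into bytes and joining eight per-bit if-ladder helper results per byte, B fills a single template string with {} placeholders in one format call, picking each placeholder word by one bit of data_u16 directly.
import Mathlib
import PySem

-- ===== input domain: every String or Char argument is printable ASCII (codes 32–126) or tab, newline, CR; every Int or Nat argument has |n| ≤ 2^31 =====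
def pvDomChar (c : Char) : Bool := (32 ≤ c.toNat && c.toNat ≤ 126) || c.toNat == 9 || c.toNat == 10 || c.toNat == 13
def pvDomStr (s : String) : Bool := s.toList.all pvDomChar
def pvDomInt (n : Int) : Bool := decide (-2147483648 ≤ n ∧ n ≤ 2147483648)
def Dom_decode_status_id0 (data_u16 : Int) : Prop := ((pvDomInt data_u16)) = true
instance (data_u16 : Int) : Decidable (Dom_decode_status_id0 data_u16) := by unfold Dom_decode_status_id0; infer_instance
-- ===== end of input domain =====

-- B fills one template string with {} placeholders in a single format call, picking each word by one bit of data_u16 directly (no byte split, no per-bit label formatting); objective: alternative decomposition, same cost.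

-- ===== PORT A =====
-- the dicts master_bits / slave_bits are only read by the unreachable fallback line of the helpers
def pvMasterBitsDict : PySem.Dict Int String :=
  PySem.Dict.ofList [(0, "CH"), (1, "DHW"), (2, "Cooling"), (3, "OTC"), (4, "CH2"), (5, "SummerMode"), (6, "DHWBlocking"), (7, "reserved")]

def pvSlaveBitsDict : PySem.Dict Int String :=
  PySem.Dict.ofList [(0, "Fault"), (1, "CHMode"), (2, "DHWMode"), (3, "Flame"), (4, "CoolingMode"), (5, "CH2Mode"), (6, "Diagnostic"), (7, "ElectricityProd")]

-- Python's 'val >> bit' / '& 1': core '>>>' with a Nat shift (bit comes from range(0,8), so bit.toNat is exact) and PySem.Int.band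
def pvPrettyMaster (bit val : Int) : String :=
  let on := PySem.Int.band (val >>> bit.toNat) 1
  if bit = 0 then PySem.Str.join "" ["CH=", if on ≠ 0 then "enabled" else "disabled"]
  else if bit = 1 then PySem.Str.join "" ["DHW=", if on ≠ 0 then "enabled" else "disabled"]
  else if bit = 2 then PySem.Str.join "" ["Cooling=", if on ≠ 0 then "enabled" else "disabled"]
  else if bit = 3 then PySem.Str.join "" ["OTC=", if on ≠ 0 then "active" else "inactive"]
  else if bit = 4 then PySem.Str.join "" ["CH2=", if on ≠ 0 then "enabled" else "disabled"]
  else if bit = 5 then PySem.Str.join "" ["Mode=", if on ≠ 0 then "summer" else "winter"]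
  else if bit = 6 then PySem.Str.join "" ["DHWBlocking=", if on ≠ 0 then "blocked" else "unblocked"]
  else if bit = 7 then "reserved"
  else PySem.Str.join "" [PySem.Dict.getD pvMasterBitsDict bit (PySem.Str.join "" ["bit", PySem.Int.toStr bit]), "=", PySem.Int.toStr on]

def pvPrettySlave (bit val : Int) : String :=
  let on := PySem.Int.band (val >>> bit.toNat) 1
  if bit = 0 then PySem.Str.join "" ["Fault=", if on ≠ 0 then "yes" else "no"]
  else if bit = 1 then PySem.Str.join "" ["CHMode=", if on ≠ 0 then "active" else "inactive"]
  else if bit = 2 then PySem.Str.join "" ["DHWMode=", if on ≠ 0 then "active" else "inactive"]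
  else if bit = 3 then PySem.Str.join "" ["Flame=", if on ≠ 0 then "on" else "off"]
  else if bit = 4 then PySem.Str.join "" ["CoolingMode=", if on ≠ 0 then "active" else "inactive"]
  else if bit = 5 then PySem.Str.join "" ["CH2Mode=", if on ≠ 0 then "active" else "inactive"]
  else if bit = 6 then PySem.Str.join "" ["Diagnostic=", if on ≠ 0 then "event" else "none"]
  else if bit = 7 then PySem.Str.join "" ["ElectricityProduction=", if on ≠ 0 then "on" else "off"]
  else PySem.Str.join "" [PySem.Dict.getD pvSlaveBitsDict bit (PySem.Str.join "" ["bit", PySem.Int.toStr bit]), "=", PySem.Int.toStr on]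

def decode_status_id0 (data_u16 : Int) : String :=
  let hb := PySem.Int.band (data_u16 >>> (8 : Nat)) 255
  let lb := PySem.Int.band data_u16 255
  let master_desc := PySem.Str.join "; " ((PySem.List.pyRange 0 8 1).map (fun b => pvPrettyMaster b hb))
  let slave_desc := PySem.Str.join "; " ((PySem.List.pyRange 0 8 1).map (fun b => pvPrettySlave b lb))
  PySem.Str.join "" ["MasterStatus(HB): ", master_desc, " | SlaveStatus(LB): ", slave_desc]

-- ===== PORT B =====
def pvTemplate : String := "MasterStatus(HB): CH={}; DHW={}; Cooling={}; OTC={}; CH2={}; Mode={}; DHWBlocking={}; reserved | SlaveStatus(LB): Fault={}; CHMode={}; DHWMode={}; Flame={}; CoolingMode={}; CH2Mode={}; Diagnostic={}; ElectricityProduction={}"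

-- (shift into data_u16, word when the bit is 0, word when the bit is 1)
def pvFields : List (Int × String × String) :=
  [(8, "disabled", "enabled"), (9, "disabled", "enabled"), (10, "disabled", "enabled"),
   (11, "inactive", "active"), (12, "disabled", "enabled"), (13, "winter", "summer"),
   (14, "unblocked", "blocked"),
   (0, "no", "yes"), (1, "inactive", "active"), (2, "inactive", "active"), (3, "off", "on"),
   (4, "inactive", "active"), (5, "inactive", "active"), (6, "none", "event"), (7, "off", "on")]

-- str.format with plain '{}' placeholders, ported by hand (exact for this template, which contains
-- no other brace): split the template on "{}" and interleave the segments with the argument strings.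
def pvInterleave : List String → List String → List String
  | s :: ss, v :: vs => s :: v :: pvInterleave ss vs
  | ss, [] => ss
  | [], _ :: _ => []

def decode_status_id0_alt (data_u16 : Int) : String :=
  let vals := pvFields.map (fun f => if PySem.Int.band (data_u16 >>> (f.1.toNat : Nat)) 1 ≠ 0 then f.2.2 else f.2.1)
  PySem.Str.join "" (pvInterleave ((PySem.Str.split? pvTemplate "{}").getD []) vals)

-- ===== PRECONDITION & SPEC =====
def Spec_decode_status_id0 (data_u16 : Int) (out : String) : Prop := out = decode_status_id0_alt data_u16
instance (data_u16 : Int) (out : String) : Decidable (Spec_decode_status_id0 data_u16 out) := by unfold Spec_decode_status_id0; infer_instance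

-- ===== CLAIM =====
def Claim_equal_decode_status_id0 : Prop := ∀ (data_u16 : Int), Dom_decode_status_id0 data_u16 → Spec_decode_status_id0 data_u16 (decode_status_id0 data_u16)

-- ===== LEMMAS AND PROOFS =====
lemma pvBandMask (a : Int) : PySem.Int.band a 255 = PySem.Int.mod a 256 := by
  unfold PySem.Int.band PySem.Int.mod
  rw [show a.fmod 256 = a % 256 by rw [Int.fmod_eq_emod]; simp]
  split_ifs with h1 h2
  · rw [show (255:Int).toNat = 2^8-1 from rfl, Nat.and_two_pow_sub_one_eq_mod]
    omega
  · omega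
  · rw [show (255:Int).toNat = 2^8-1 from rfl, Nat.and_comm, Nat.and_two_pow_sub_one_eq_mod]
    omega
  · omega

-- master bit i of A's hb is bit 8+i of data_u16; slave bit i of A's lb is bit i of data_u16
lemma pvBitHB (d : Int) (i : Nat) (hi : i ≤ 6) :
    PySem.Int.band ((PySem.Int.band (d >>> (8 : Nat)) 255) >>> i) 1 = PySem.Int.band (d >>> (8 + i)) 1 := by
  rw [PySem.Int.band_one, PySem.Int.band_one, pvBandMask]
  simp only [PySem.Int.mod, Int.shiftRight_eq_div_pow]
  norm_num [Int.fmod_eq_emod]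
  interval_cases i <;> omega

lemma pvBitLB (d : Int) (i : Nat) (hi : i ≤ 7) :
    PySem.Int.band ((PySem.Int.band d 255) >>> i) 1 = PySem.Int.band (d >>> i) 1 := by
  rw [PySem.Int.band_one, PySem.Int.band_one, pvBandMask]
  simp only [PySem.Int.mod, Int.shiftRight_eq_div_pow]
  norm_num [Int.fmod_eq_emod]
  interval_cases i <;> omega

lemma pvM0 (d : Int) : pvPrettyMaster 0 (PySem.Int.band (d >>> (8 : Nat)) 255) =
    PySem.Str.join "" ["CH=", if PySem.Int.band (d >>> (8 : Nat)) 1 ≠ 0 then "enabled" else "disabled"] := by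
  have h := pvBitHB d 0 (by omega); norm_num at h
  simp [pvPrettyMaster, h]

lemma pvM1 (d : Int) : pvPrettyMaster 1 (PySem.Int.band (d >>> (8 : Nat)) 255) =
    PySem.Str.join "" ["DHW=", if PySem.Int.band (d >>> (9 : Nat)) 1 ≠ 0 then "enabled" else "disabled"] := by
  have h := pvBitHB d 1 (by omega); norm_num at h
  simp [pvPrettyMaster, h]

lemma pvM2 (d : Int) : pvPrettyMaster 2 (PySem.Int.band (d >>> (8 : Nat)) 255) =
    PySem.Str.join "" ["Cooling=", if PySem.Int.band (d >>> (10 : Nat)) 1 ≠ 0 then "enabled" else "disabled"] := by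
  have h := pvBitHB d 2 (by omega); norm_num at h
  simp [pvPrettyMaster, h]

lemma pvM3 (d : Int) : pvPrettyMaster 3 (PySem.Int.band (d >>> (8 : Nat)) 255) =
    PySem.Str.join "" ["OTC=", if PySem.Int.band (d >>> (11 : Nat)) 1 ≠ 0 then "active" else "inactive"] := by
  have h := pvBitHB d 3 (by omega); norm_num at h
  simp [pvPrettyMaster, h]

lemma pvM4 (d : Int) : pvPrettyMaster 4 (PySem.Int.band (d >>> (8 : Nat)) 255) =
    PySem.Str.join "" ["CH2=", if PySem.Int.band (d >>> (12 : Nat)) 1 ≠ 0 then "enabled" else "disabled"] := by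
  have h := pvBitHB d 4 (by omega); norm_num at h
  simp [pvPrettyMaster, h]

lemma pvM5 (d : Int) : pvPrettyMaster 5 (PySem.Int.band (d >>> (8 : Nat)) 255) =
    PySem.Str.join "" ["Mode=", if PySem.Int.band (d >>> (13 : Nat)) 1 ≠ 0 then "summer" else "winter"] := by
  have h := pvBitHB d 5 (by omega); norm_num at h
  simp [pvPrettyMaster, h]

lemma pvM6 (d : Int) : pvPrettyMaster 6 (PySem.Int.band (d >>> (8 : Nat)) 255) =
    PySem.Str.join "" ["DHWBlocking=", if PySem.Int.band (d >>> (14 : Nat)) 1 ≠ 0 then "blocked" else "unblocked"] := by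
  have h := pvBitHB d 6 (by omega); norm_num at h
  simp [pvPrettyMaster, h]

lemma pvM7 (v : Int) : pvPrettyMaster 7 v = "reserved" := by
  simp [pvPrettyMaster]

lemma pvS0 (d : Int) : pvPrettySlave 0 (PySem.Int.band d 255) =
    PySem.Str.join "" ["Fault=", if PySem.Int.band (d >>> (0 : Nat)) 1 ≠ 0 then "yes" else "no"] := by
  have h := pvBitLB d 0 (by omega)
  simp only [Int.shiftRight_zero] at h
  simp [pvPrettySlave, h]

lemma pvS1 (d : Int) : pvPrettySlave 1 (PySem.Int.band d 255) =
    PySem.Str.join "" ["CHMode=", if PySem.Int.band (d >>> (1 : Nat)) 1 ≠ 0 then "active" else "inactive"] := by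
  have h := pvBitLB d 1 (by omega)
  simp [pvPrettySlave, h]

lemma pvS2 (d : Int) : pvPrettySlave 2 (PySem.Int.band d 255) =
    PySem.Str.join "" ["DHWMode=", if PySem.Int.band (d >>> (2 : Nat)) 1 ≠ 0 then "active" else "inactive"] := by
  have h := pvBitLB d 2 (by omega)
  simp [pvPrettySlave, h]

lemma pvS3 (d : Int) : pvPrettySlave 3 (PySem.Int.band d 255) =
    PySem.Str.join "" ["Flame=", if PySem.Int.band (d >>> (3 : Nat)) 1 ≠ 0 then "on" else "off"] := by
  have h := pvBitLB d 3 (by omega)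
  simp [pvPrettySlave, h]

lemma pvS4 (d : Int) : pvPrettySlave 4 (PySem.Int.band d 255) =
    PySem.Str.join "" ["CoolingMode=", if PySem.Int.band (d >>> (4 : Nat)) 1 ≠ 0 then "active" else "inactive"] := by
  have h := pvBitLB d 4 (by omega)
  simp [pvPrettySlave, h]

lemma pvS5 (d : Int) : pvPrettySlave 5 (PySem.Int.band d 255) =
    PySem.Str.join "" ["CH2Mode=", if PySem.Int.band (d >>> (5 : Nat)) 1 ≠ 0 then "active" else "inactive"] := by
  have h := pvBitLB d 5 (by omega)
  simp [pvPrettySlave, h]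

lemma pvS6 (d : Int) : pvPrettySlave 6 (PySem.Int.band d 255) =
    PySem.Str.join "" ["Diagnostic=", if PySem.Int.band (d >>> (6 : Nat)) 1 ≠ 0 then "event" else "none"] := by
  have h := pvBitLB d 6 (by omega)
  simp [pvPrettySlave, h]

lemma pvS7 (d : Int) : pvPrettySlave 7 (PySem.Int.band d 255) =
    PySem.Str.join "" ["ElectricityProduction=", if PySem.Int.band (d >>> (7 : Nat)) 1 ≠ 0 then "on" else "off"] := by
  have h := pvBitLB d 7 (by omega)
  simp [pvPrettySlave, h]

lemma pvSegs : (PySem.Str.split? pvTemplate "{}").getD [] =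
    ["MasterStatus(HB): CH=", "; DHW=", "; Cooling=", "; OTC=", "; CH2=", "; Mode=", "; DHWBlocking=",
     "; reserved | SlaveStatus(LB): Fault=", "; CHMode=", "; DHWMode=", "; Flame=", "; CoolingMode=",
     "; CH2Mode=", "; Diagnostic=", "; ElectricityProduction=", ""] := by
  set_option maxRecDepth 8192 in decide

lemma pvAssemble (w0 w1 w2 w3 w4 w5 w6 w7 w8 w9 w10 w11 w12 w13 w14 : String) :
    PySem.Str.join "" ["MasterStatus(HB): ",
      PySem.Str.join "; " [PySem.Str.join "" ["CH=", w0], PySem.Str.join "" ["DHW=", w1],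
        PySem.Str.join "" ["Cooling=", w2], PySem.Str.join "" ["OTC=", w3], PySem.Str.join "" ["CH2=", w4],
        PySem.Str.join "" ["Mode=", w5], PySem.Str.join "" ["DHWBlocking=", w6], "reserved"],
      " | SlaveStatus(LB): ",
      PySem.Str.join "; " [PySem.Str.join "" ["Fault=", w7], PySem.Str.join "" ["CHMode=", w8],
        PySem.Str.join "" ["DHWMode=", w9], PySem.Str.join "" ["Flame=", w10], PySem.Str.join "" ["CoolingMode=", w11],
        PySem.Str.join "" ["CH2Mode=", w12], PySem.Str.join "" ["Diagnostic=", w13],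
        PySem.Str.join "" ["ElectricityProduction=", w14]]]
    = PySem.Str.join "" (pvInterleave ((PySem.Str.split? pvTemplate "{}").getD [])
        [w0, w1, w2, w3, w4, w5, w6, w7, w8, w9, w10, w11, w12, w13, w14]) := by
  rw [pvSegs]
  apply String.toList_inj.mp
  simp [pvInterleave, PySem.Str.toList_join, PySem.Chars.join, List.intercalate]

-- ===== VERDICT =====
set_option maxRecDepth 8192 in
theorem decode_status_id0_spec : Claim_equal_decode_status_id0 := by
  intro d _
  unfold Spec_decode_status_id0 decode_status_id0 decode_status_id0_alt
  simp only []
  rw [show PySem.List.pyRange 0 8 1 = [0,1,2,3,4,5,6,7] from by decide]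
  simp only [List.map_cons, List.map_nil, pvFields, Int.reduceToNat]
  rw [pvM0, pvM1, pvM2, pvM3, pvM4, pvM5, pvM6, pvM7, pvS0, pvS1, pvS2, pvS3, pvS4, pvS5, pvS6, pvS7]
  exact pvAssemble _ _ _ _ _ _ _ _ _ _ _ _ _ _ _
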